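-- pv_equiv track=rewrite | github.com/VladiDemirev/fundamentals | TextProcessingExercise/10WinningTicket.py | matching_symbols
-- ===== SOURCE A (Python) =====
-- def matching_symbols(part, matching_symbol):
--     current_streak = 0
--     best_uninterrupted = 0
--     for char in part:
--         if char == matching_symbol:
--             current_streak += 1
--         else:
--             best_uninterrupted = max(best_uninterrupted, current_streak)
--             current_streak = 0
--     return max(best_uninterrupted, current_streak)
-- ===== SOURCE B (Python) =====
-- from itertools import groupby
--
--
-- def matching_symbols(part, matching_symbol):
--     return max(
--         (sum(1 for _ in group) for key, group in groupby(part) if key == matching_symbol),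
--         default=0,
--     )
-- ===== Notes on version B (the rewrite author's own statement) =====
-- stated objective: idiomatic
-- what changed: Replaces the explicit current_streak/best state machine with itertools.groupby: split the string into maximal runs, keep runs whose key equals matching_symbol, and take the max run length with default 0.
import Mathlib
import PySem

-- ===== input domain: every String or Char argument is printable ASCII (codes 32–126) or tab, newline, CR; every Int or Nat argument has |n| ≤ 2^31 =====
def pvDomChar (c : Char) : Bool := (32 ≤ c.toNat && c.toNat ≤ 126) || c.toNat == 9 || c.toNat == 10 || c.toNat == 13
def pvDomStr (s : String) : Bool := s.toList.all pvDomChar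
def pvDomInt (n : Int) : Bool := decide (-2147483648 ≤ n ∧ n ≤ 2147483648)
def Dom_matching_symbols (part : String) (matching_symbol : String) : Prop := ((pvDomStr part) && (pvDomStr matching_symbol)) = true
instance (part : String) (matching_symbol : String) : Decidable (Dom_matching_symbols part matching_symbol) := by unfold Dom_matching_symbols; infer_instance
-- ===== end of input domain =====

-- B replaces A's streak/best state machine by a group-into-maximal-runs pass (itertools.groupby) and takes the max length of matching runs; same cost, different decomposition.

-- ===== PORT A =====
-- the for-loop over the characters, carrying (current_streak, best_uninterrupted)
def matchingLoopA (ms : String) : List Char → Int → Int → Int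
  | [], cur, best => max best cur
  | c :: t, cur, best =>
      if String.ofList [c] = ms then matchingLoopA ms t (cur + 1) best
      else matchingLoopA ms t 0 (max best cur)

def matching_symbols (part : String) (matching_symbol : String) : Int :=
  matchingLoopA matching_symbol part.toList 0 0

-- ===== PORT B =====
-- port of itertools.groupby + sum(1 for _ in group): maximal runs as (key, length) pairs
def runsAux (c : Char) (n : Nat) : List Char → List (Char × Nat)
  | [] => [(c, n)]
  | d :: t => if d = c then runsAux c (n + 1) t else (c, n) :: runsAux d 1 t

def runsOf : List Char → List (Char × Nat)
  | [] => []
  | c :: t => runsAux c 1 t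

-- max over the matching runs' lengths, default 0
def matching_symbols_alt (part : String) (matching_symbol : String) : Int :=
  (runsOf part.toList).foldl
    (fun acc kn => if String.ofList [kn.1] = matching_symbol then max acc (kn.2 : Int) else acc) 0

-- ===== PRECONDITION & SPEC =====
def Spec_matching_symbols (part : String) (matching_symbol : String) (out : Int) : Prop := out = matching_symbols_alt part matching_symbol
instance (part : String) (matching_symbol : String) (out : Int) : Decidable (Spec_matching_symbols part matching_symbol out) := by unfold Spec_matching_symbols; infer_instance

-- ===== CLAIM (what is proved, stated in full; the proofs are below) =====
def Claim_equal_matching_symbols : Prop := ∀ (part : String) (matching_symbol : String), Dom_matching_symbols part matching_symbol → Spec_matching_symbols part matching_symbol (matching_symbols part matching_symbol)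

-- ===== LEMMAS AND PROOFS =====

-- invariant: while scanning a run with key c already n long, A's current_streak is n if c matches, else 0
theorem matchingLoopA_runsAux (ms : String) (t : List Char) : ∀ (c : Char) (n : Nat) (best : Int), 0 ≤ best →
    matchingLoopA ms t (if String.ofList [c] = ms then (n : Int) else 0) best
      = (runsAux c n t).foldl
          (fun acc kn => if String.ofList [kn.1] = ms then max acc (kn.2 : Int) else acc) best := by
  induction t with
  | nil =>
    intro c n best hb
    simp only [matchingLoopA, runsAux, List.foldl]
    split_ifs <;> omega
  | cons d t ih =>
    intro c n best hb
    by_cases hdc : d = c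
    · subst hdc
      simp only [matchingLoopA, runsAux]
      by_cases hc : String.ofList [d] = ms
      · rw [if_pos hc, if_pos hc]
        have : ((n : Int) + 1) = ((n + 1 : Nat) : Int) := by push_cast; ring
        rw [this, ← if_pos (c := String.ofList [d] = ms) hc (t := ((n + 1 : Nat) : Int)) (e := 0)]
        exact ih d (n + 1) best hb
      · rw [if_neg hc, if_neg hc]
        have hmb : max best 0 = best := by omega
        rw [hmb, ← if_neg (c := String.ofList [d] = ms) hc (t := ((n + 1 : Nat) : Int)) (e := 0)]
        exact ih d (n + 1) best hb
    · simp only [matchingLoopA, runsAux, if_neg hdc, List.foldl]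
      by_cases hd : String.ofList [d] = ms
      · have hc : ¬ String.ofList [c] = ms := by
          intro hc
          have h2 := congrArg String.toList (hd.trans hc.symm)
          simp at h2
          exact hdc h2
        rw [if_neg hc, if_pos hd, if_neg hc]
        have : (0 : Int) + 1 = ((1 : Nat) : Int) := by norm_num
        rw [this, ← if_pos (c := String.ofList [d] = ms) hd (t := ((1 : Nat) : Int)) (e := 0)]
        exact ih d 1 best hb
      · rw [if_neg hd]
        by_cases hc : String.ofList [c] = ms
        · rw [if_pos hc, if_pos hc]
          rw [← if_neg (c := String.ofList [d] = ms) hd (t := ((1 : Nat) : Int)) (e := 0)]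
          exact ih d 1 (max best n) (by omega)
        · rw [if_neg hc, if_neg hc]
          have hmb : max best 0 = best := by omega
          rw [hmb, ← if_neg (c := String.ofList [d] = ms) hd (t := ((1 : Nat) : Int)) (e := 0)]
          exact ih d 1 best hb

-- ===== VERDICT (by name: the statement is the Claim_ definition above) =====
theorem matching_symbols_spec : Claim_equal_matching_symbols := by
  intro part ms _
  unfold Spec_matching_symbols matching_symbols matching_symbols_alt
  cases hl : part.toList with
  | nil => simp [matchingLoopA, runsOf]
  | cons c t =>
    simp only [matchingLoopA, runsOf]
    have h := matchingLoopA_runsAux ms t c 1 0 le_rfl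
    by_cases hc : String.ofList [c] = ms
    · rw [if_pos hc] at h ⊢
      simpa using h
    · rw [if_neg hc] at h ⊢
      simpa using h
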